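-- pv_equiv track=rewrite | github.com/Obraka/Advent | twotwo.py | checka
-- ===== SOURCE A (Python) =====
-- def checka(values):
--     invalid = 0
--     asc = 0
--     dsc = 0
--     for index, data in enumerate(values):
--         if index < len(values)-1:
--             diff = abs(values[index+1] - values[index])
--             # Check if diff is legal
--             if not(diff > 0 and diff <= 3):
--                 invalid = 1
--             # Check if diff is pos or neg
--             if (values[index+1]-values[index])>0:
--                 asc += 1
--             else:
--                 dsc += 1
--     # Check if all diffs are pos or all neg
--     if asc > 0 and dsc > 0:
--         invalid = 1
--
--     if (invalid == 0):
--         return 1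
-- ===== SOURCE B (Python) =====
-- def checka(values):
--     if all(1 <= abs(b - a) <= 3 for a, b in zip(values, values[1:])):
--         if values == sorted(values) or values == sorted(values, reverse=True):
--             return 1
-- ===== Notes on version B (the rewrite author's own statement) =====
-- stated objective: idiomatic
-- what changed: Replaces the counter-based index loop (invalid/asc/dsc counters with explicit indexing) by an all() over zipped adjacent pairs plus a sort-and-compare monotonicity test (values == sorted(values) or its reverse).
import Mathlib
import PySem

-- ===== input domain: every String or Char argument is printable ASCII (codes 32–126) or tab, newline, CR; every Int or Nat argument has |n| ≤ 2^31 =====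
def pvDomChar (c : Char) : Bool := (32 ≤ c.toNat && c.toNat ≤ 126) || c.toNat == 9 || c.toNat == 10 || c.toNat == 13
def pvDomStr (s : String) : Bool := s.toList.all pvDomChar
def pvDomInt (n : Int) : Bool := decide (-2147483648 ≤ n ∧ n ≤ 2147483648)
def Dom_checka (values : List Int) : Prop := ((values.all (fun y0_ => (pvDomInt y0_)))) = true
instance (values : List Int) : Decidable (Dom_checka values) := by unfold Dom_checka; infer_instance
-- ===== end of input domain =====

-- B replaces A's counter-based index loop by an all() over zipped adjacent pairs
-- plus a sort-and-compare monotonicity test (more idiomatic; not faster).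


-- ===== PORT A =====
def checka (values : List Int) : Option Int :=
  let st :=
    (PySem.List.enumerate values 0).foldl
      (fun (s : Int × Int × Int) (p : Int × Int) =>
        if p.1 < (values.length : Int) - 1 then
          let diff := |PySem.List.pyGetD values (p.1 + 1) 0 - PySem.List.pyGetD values p.1 0|
          let invalid := if ¬(diff > 0 ∧ diff ≤ 3) then (1 : Int) else s.1
          if PySem.List.pyGetD values (p.1 + 1) 0 - PySem.List.pyGetD values p.1 0 > 0 then
            (invalid, s.2.1 + 1, s.2.2)
          else
            (invalid, s.2.1, s.2.2 + 1)
        else s)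
      ((0 : Int), (0 : Int), (0 : Int))
  let invalid := if st.2.1 > 0 ∧ st.2.2 > 0 then (1 : Int) else st.1
  if invalid = 0 then some 1 else none

-- ===== PORT B =====
def checka_alt (values : List Int) : Option Int :=
  if (values.zip (PySem.List.slice values (some 1) none)).all
      (fun p => decide (1 ≤ |p.2 - p.1| ∧ |p.2 - p.1| ≤ 3)) then
    if values = PySem.List.sorted values (fun x => x) false ∨
       values = PySem.List.sorted values (fun x => x) true then
      some 1
    else none
  else none

-- ===== PRECONDITION & SPEC =====
def Spec_checka (values : List Int) (out : Option Int) : Prop := out = checka_alt values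
instance (values : List Int) (out : Option Int) : Decidable (Spec_checka values out) := by unfold Spec_checka; infer_instance

-- ===== CLAIM (what is proved, stated in full; the proofs are below) =====
def Claim_equal_checka : Prop := ∀ (values : List Int), Dom_checka values → Spec_checka values (checka values)

-- ===== LEMMAS AND PROOFS =====

-- the pair-level step function that A's loop body performs at each index k < n-1
def pvStep (s : Int × Int × Int) (p : Int × Int) : Int × Int × Int :=
  let invalid := if ¬(|p.2 - p.1| > 0 ∧ |p.2 - p.1| ≤ 3) then (1 : Int) else s.1
  if p.2 - p.1 > 0 then (invalid, s.2.1 + 1, s.2.2) else (invalid, s.2.1, s.2.2 + 1)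

-- adjacent-pair universal statement ↔ Chain'
theorem pvZipTailForallIffChain {α : Type} (R : α → α → Prop) (l : List α) :
    (∀ p ∈ l.zip l.tail, R p.1 p.2) ↔ List.IsChain R l := by
  induction l with
  | nil => simp [List.isChain_nil]
  | cons a t ih =>
    cases t with
    | nil => simp [List.isChain_singleton]
    | cons b t' =>
      simp only [List.tail_cons, List.zip_cons_cons, List.isChain_cons_cons, List.mem_cons] at *
      constructor
      · intro h
        exact ⟨h (a, b) (Or.inl rfl), ih.mp (fun p hp => h p (Or.inr hp))⟩
      · rintro ⟨hab, hc⟩ p hp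
        rcases hp with h | h
        · subst h; exact hab
        · exact ih.mpr hc p h

-- A's loop over enumerate equals the pvStep fold over the adjacent-pair list
theorem pvLoopEq (values : List Int) :
    ∀ (d : List Int) (k : Nat) (s : Int × Int × Int), values.drop k = d →
    (PySem.List.enumerate d (k : Int)).foldl
      (fun (s : Int × Int × Int) (p : Int × Int) =>
        if p.1 < (values.length : Int) - 1 then
          let diff := |PySem.List.pyGetD values (p.1 + 1) 0 - PySem.List.pyGetD values p.1 0|
          let invalid := if ¬(diff > 0 ∧ diff ≤ 3) then (1 : Int) else s.1
          if PySem.List.pyGetD values (p.1 + 1) 0 - PySem.List.pyGetD values p.1 0 > 0 then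
            (invalid, s.2.1 + 1, s.2.2)
          else
            (invalid, s.2.1, s.2.2 + 1)
        else s) s
    = ((values.zip values.tail).drop k).foldl pvStep s := by
  intro d
  induction d with
  | nil =>
    intro k s hd
    have hk : values.length ≤ k := by
      by_contra h
      push_neg at h
      have := List.drop_eq_nil_iff.mp hd
      omega
    have hz : (values.zip values.tail).length ≤ k := by
      have := List.length_zip (l₁ := values) (l₂ := values.tail)
      simp [List.length_tail] at this ⊢
      omega
    rw [List.drop_eq_nil_iff.mpr hz]
    simp [PySem.List.enumerate_nil]
  | cons x rest ih =>
    intro k s hd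
    have hk : k < values.length := by
      by_contra h
      push_neg at h
      rw [List.drop_eq_nil_iff.mpr h] at hd
      simp at hd
    have hcons : values[k] :: values.drop (k + 1) = x :: rest := by
      rw [← List.drop_eq_getElem_cons hk, hd]
    have hx : values[k] = x := (List.cons.injEq _ _ _ _ ▸ hcons) |>.1
    have hrest : values.drop (k + 1) = rest := (List.cons.injEq _ _ _ _ ▸ hcons) |>.2
    rw [PySem.List.enumerate_cons, List.foldl_cons]
    by_cases hlt : k + 1 < values.length
    · -- k < n - 1 : the guard fires
      have hguard : ((k : Int) < (values.length : Int) - 1) := by push_cast; omega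
      have hgk : PySem.List.pyGetD values ((k : Int)) 0 = values[k] := by
        rw [PySem.List.pyGetD_natCast, List.getD_eq_getElem _ _ (by omega)]
      have hgk1 : PySem.List.pyGetD values ((k : Int) + 1) 0 = values[k + 1] := by
        rw [show ((k : Int) + 1) = ((k + 1 : Nat) : Int) by push_cast; ring,
            PySem.List.pyGetD_natCast, List.getD_eq_getElem _ _ (by omega)]
      have hzlen : k < (values.zip values.tail).length := by
        have := List.length_zip (l₁ := values) (l₂ := values.tail)
        simp [List.length_tail] at this ⊢
        omega
      have hzdrop : (values.zip values.tail).drop k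
          = (values[k], values[k + 1]) :: (values.zip values.tail).drop (k + 1) := by
        rw [List.drop_eq_getElem_cons hzlen]
        congr 1
        rw [List.getElem_zip]
        congr 1
        rw [List.getElem_tail]
      rw [hzdrop, List.foldl_cons]
      have hcast : ((k : Int) + 1) = ((k + 1 : Nat) : Int) := by push_cast; ring
      rw [if_pos hguard, hgk, hgk1, hcast]
      exact ih (k + 1) _ hrest
    · -- k = n - 1 : the guard is false, and rest = [] and the pairs are exhausted
      have hkn : k + 1 = values.length := by omega
      have hguard : ¬ ((k : Int) < (values.length : Int) - 1) := by push_cast; omega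
      have hrest0 : rest = [] := by
        rw [← hrest]
        exact List.drop_eq_nil_iff.mpr (by omega)
      have hz : (values.zip values.tail).length ≤ k := by
        have := List.length_zip (l₁ := values) (l₂ := values.tail)
        simp [List.length_tail] at this ⊢
        omega
      rw [if_neg hguard, hrest0, List.drop_eq_nil_iff.mpr hz]
      simp [PySem.List.enumerate_nil]

-- characterization of the pvStep fold
theorem pvFoldStep (ps : List (Int × Int)) :
    ∀ (inv asc dsc : Int),
    ps.foldl pvStep (inv, asc, dsc)
    = ((if ps.all (fun p => decide (|p.2 - p.1| > 0 ∧ |p.2 - p.1| ≤ 3)) then inv else 1),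
       asc + (ps.countP (fun p => decide (p.2 - p.1 > 0)) : Int),
       dsc + (ps.countP (fun p => decide (¬ p.2 - p.1 > 0)) : Int)) := by
  induction ps with
  | nil => intro inv asc dsc; simp
  | cons p t ih =>
    intro inv asc dsc
    rw [List.foldl_cons]
    by_cases hg : |p.2 - p.1| > 0 ∧ |p.2 - p.1| ≤ 3
    · by_cases hp : p.1 < p.2
      · rw [show pvStep (inv, asc, dsc) p = (inv, asc + 1, dsc) from by simp [pvStep, hg, hp], ih,
           List.all_cons, List.countP_cons, List.countP_cons,
           decide_eq_true hg, decide_eq_true (show p.2 - p.1 > 0 by omega),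
           decide_eq_false (not_not_intro (show p.2 - p.1 > 0 by omega)), Bool.true_and]
        simp only [Prod.mk.injEq]
        refine ⟨by simp <;> omega, by simp <;> omega, by simp <;> omega⟩
      · rw [show pvStep (inv, asc, dsc) p = (inv, asc, dsc + 1) from by simp [pvStep, hg, hp], ih,
           List.all_cons, List.countP_cons, List.countP_cons,
           decide_eq_true hg, decide_eq_false (show ¬ p.2 - p.1 > 0 by omega),
           decide_eq_true (show ¬ p.2 - p.1 > 0 by omega), Bool.true_and]
        simp only [Prod.mk.injEq]
        refine ⟨by simp <;> omega, by simp <;> omega, by simp <;> omega⟩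
    · by_cases hp : p.1 < p.2
      · rw [show pvStep (inv, asc, dsc) p = (1, asc + 1, dsc) from by
            simp only [pvStep]
            rw [if_pos hg, if_pos (show p.2 - p.1 > 0 by omega)], ih,
           List.all_cons, List.countP_cons, List.countP_cons,
           decide_eq_false hg, decide_eq_true (show p.2 - p.1 > 0 by omega),
           decide_eq_false (not_not_intro (show p.2 - p.1 > 0 by omega)), Bool.false_and]
        simp only [Prod.mk.injEq]
        refine ⟨by simp <;> omega, by simp <;> omega, by simp <;> omega⟩
      · rw [show pvStep (inv, asc, dsc) p = (1, asc, dsc + 1) from by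
            simp only [pvStep]
            rw [if_pos hg, if_neg (show ¬ p.2 - p.1 > 0 by omega)], ih,
           List.all_cons, List.countP_cons, List.countP_cons,
           decide_eq_false hg, decide_eq_false (show ¬ p.2 - p.1 > 0 by omega),
           decide_eq_true (show ¬ p.2 - p.1 > 0 by omega), Bool.false_and]
        simp only [Prod.mk.injEq]
        refine ⟨by simp <;> omega, by simp <;> omega, by simp <;> omega⟩

theorem checka_spec_aux (values : List Int) :
    checka values = checka_alt values := by
  have hpairs : PySem.List.slice values (some 1) none = values.tail :=
    PySem.List.slice_from_one values
  have hloop := pvLoopEq values values 0 (0, 0, 0) (by simp)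
  unfold checka checka_alt
  simp only [List.drop_zero, Nat.cast_zero] at hloop ⊢
  rw [hloop, pvFoldStep, hpairs]
  set ps := values.zip values.tail with hps
  -- the two "all" conditions agree
  have hall : ps.all (fun p => decide (|p.2 - p.1| > 0 ∧ |p.2 - p.1| ≤ 3))
      = ps.all (fun p => decide (1 ≤ |p.2 - p.1| ∧ |p.2 - p.1| ≤ 3)) := by
    rw [Bool.eq_iff_iff]
    simp only [List.all_eq_true, decide_eq_true_eq]
    constructor <;> (intro h p hp; have := h p hp; omega)
  by_cases hgood : ps.all (fun p => decide (1 ≤ |p.2 - p.1| ∧ |p.2 - p.1| ≤ 3)) = true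
  · -- all differences legal; compare monotonicity tests
    have hgood' : ∀ p ∈ ps, 1 ≤ |p.2 - p.1| ∧ |p.2 - p.1| ≤ 3 := by
      simpa only [List.all_eq_true, decide_eq_true_eq] using hgood
    -- values == sorted(values) ↔ no non-ascending adjacent pair
    have hasc : values = PySem.List.sorted values (fun x => x) false
        ↔ ps.countP (fun p => decide (¬ p.2 - p.1 > 0)) = 0 := by
      rw [List.countP_eq_zero]
      constructor
      · intro h p hp
        have hpw : values.Pairwise (· ≤ ·) := by
          have := PySem.List.sorted_pairwise values (fun x => x) (κ := Int)
          rw [← h] at this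
          exact this
        have hch : List.IsChain (· ≤ ·) values := hpw.isChain
        have hle := (pvZipTailForallIffChain (· ≤ ·) values).mpr hch p hp
        have hb := hgood' p hp
        rw [abs_of_nonneg (by omega : (0:Int) ≤ p.2 - p.1)] at hb
        simp only [decide_eq_true_eq]
        omega
      · intro h
        have hch : List.IsChain (· < ·) values := by
          apply (pvZipTailForallIffChain (· < ·) values).mp
          intro p hp
          have := h p hp
          simp only [decide_eq_true_eq] at this
          omega
        have hpw : values.Pairwise (· ≤ ·) :=
          (List.isChain_iff_pairwise.mp hch).imp (fun h => le_of_lt h)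
        exact (PySem.List.sorted_eq_self_of_pairwise values (fun x => x) hpw).symm
      -- values == sorted(values, reverse=True) ↔ no ascending adjacent pair
    have hdsc : values = PySem.List.sorted values (fun x => x) true
        ↔ ps.countP (fun p => decide (p.2 - p.1 > 0)) = 0 := by
      rw [List.countP_eq_zero]
      constructor
      · intro h p hp
        have hpw : values.Pairwise (fun a b => b ≤ a) := by
          have := PySem.List.sorted_pairwise_rev values (fun x => x) (κ := Int)
          rw [← h] at this
          exact this
        have hch : List.IsChain (fun a b => b ≤ a) values := hpw.isChain
        have hge := (pvZipTailForallIffChain (fun a b => b ≤ a) values).mpr hch p hp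
        simp only [decide_eq_true_eq]
        omega
      · intro h
        have hch : List.IsChain (fun a b : Int => b < a) values := by
          apply (pvZipTailForallIffChain (fun a b : Int => b < a) values).mp
          intro p hp
          have h1 := h p hp
          simp only [decide_eq_true_eq] at h1
          have h2 := hgood' p hp
          rw [abs_of_nonpos (by omega : p.2 - p.1 ≤ 0)] at h2
          omega
        have hpw : values.Pairwise (fun a b : Int => b ≤ a) := by
          exact (List.isChain_iff_pairwise.mp hch).imp (fun h => le_of_lt h)
        exact (PySem.List.sorted_rev_eq_self_of_pairwise values (fun x => x) hpw).symm
    rw [hall, if_pos hgood, if_pos hgood]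
    by_cases hmono : values = PySem.List.sorted values (fun x => x) false ∨
        values = PySem.List.sorted values (fun x => x) true
    · rw [if_pos hmono]
      have hA : ¬((0:Int) + (ps.countP (fun p => decide (p.2 - p.1 > 0)) : Int) > 0
          ∧ (0:Int) + (ps.countP (fun p => decide (¬ p.2 - p.1 > 0)) : Int) > 0) := by
        rcases hmono with hm | hm
        · have h0 := hasc.mp hm
          intro hc
          omega
        · have h0 := hdsc.mp hm
          intro hc
          omega
      rw [if_neg hA]
      norm_num
    · rw [if_neg hmono]
      push_neg at hmono
      obtain ⟨hm1, hm2⟩ := hmono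
      have h1 : ps.countP (fun p => decide (¬ p.2 - p.1 > 0)) ≠ 0 := fun h => hm1 (hasc.mpr h)
      have h2 : ps.countP (fun p => decide (p.2 - p.1 > 0)) ≠ 0 := fun h => hm2 (hdsc.mpr h)
      have hA : ((0:Int) + (ps.countP (fun p => decide (p.2 - p.1 > 0)) : Int) > 0
           ∧ (0:Int) + (ps.countP (fun p => decide (¬ p.2 - p.1 > 0)) : Int) > 0) := by
        constructor <;> omega
      rw [if_pos hA]
      norm_num
  · rw [hall, if_neg hgood, if_neg hgood, ite_self]
    norm_num

-- ===== VERDICT (by name: the statement is the Claim_ definition above) =====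
theorem checka_spec : Claim_equal_checka := by
  intro values _
  exact checka_spec_aux values
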